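-- pv_equiv track=rewrite | github.com/ni-da/iap_1819 | vbExamen/StrangeOrder.py | strange_order
-- ===== SOURCE A (Python) =====
-- def strange_order(s, t):
--     shortest_length = 0
--     if len(s) < len(t):
--         shortest_length = len(s)
--     else:
--         shortest_length = len(t)
--     for i in range(shortest_length):
--         if i % 2 == 0:
--             if s[i] >= t[i]:
--                 return False
--         else:
--             if s[i] <= t[i]:
--                 return False
--     return True
-- ===== SOURCE B (Python) =====
-- def strange_order(s, t):
--     m = min(len(s), len(t))
--     se, te = s[:m], t[:m]
--     return (all(a < b for a, b in zip(se[::2], te[::2]))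
--             and all(a > b for a, b in zip(se[1::2], te[1::2])))
-- ===== Notes on version B (the rewrite author's own statement) =====
-- stated objective: alternative
-- what changed: Replaces the single index loop with a parity branch and early return by truncating both strings to the common length and checking the even-position and odd-position subsequences as two independent slice/zip passes.
import Mathlib
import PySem

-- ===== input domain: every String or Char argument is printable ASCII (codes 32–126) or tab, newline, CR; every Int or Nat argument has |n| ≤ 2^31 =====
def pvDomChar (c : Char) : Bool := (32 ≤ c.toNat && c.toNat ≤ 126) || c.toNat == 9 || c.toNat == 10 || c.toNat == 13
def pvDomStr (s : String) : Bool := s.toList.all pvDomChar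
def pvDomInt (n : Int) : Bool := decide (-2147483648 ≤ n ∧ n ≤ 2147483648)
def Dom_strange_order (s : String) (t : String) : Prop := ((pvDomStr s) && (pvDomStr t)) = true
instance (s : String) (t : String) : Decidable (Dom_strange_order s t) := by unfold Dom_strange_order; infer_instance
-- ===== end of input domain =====

-- B replaces A's single index loop with parity branches by truncating to the common length and checking the even- and odd-position subsequences as two independent slice/zip passes (objective: alternative decomposition, same cost).


-- ===== PORT A =====
-- loop of A: for i in range(shortest_length) with early 'return False'
def strangeLoopA (ls lt : List Char) (m i : Nat) : Bool :=
  if h : i < m then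
    if i % 2 == 0 then
      if ls.getD i ' ' ≥ lt.getD i ' ' then false else strangeLoopA ls lt m (i + 1)
    else
      if ls.getD i ' ' ≤ lt.getD i ' ' then false else strangeLoopA ls lt m (i + 1)
  else true
termination_by m - i
decreasing_by all_goals omega

def strange_order (s : String) (t : String) : Bool :=
  let ls := s.toList
  let lt := t.toList
  let shortest_length := if ls.length < lt.length then ls.length else lt.length
  strangeLoopA ls lt shortest_length 0

-- ===== PORT B =====
def strange_order_alt (s : String) (t : String) : Bool :=
  let m : Nat := min s.toList.length t.toList.length
  let se := PySem.List.slice s.toList none (some (m : Int))   -- s[:m]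
  let te := PySem.List.slice t.toList none (some (m : Int))   -- t[:m]
  (((PySem.List.slice? se none none 2).getD []).zip
     ((PySem.List.slice? te none none 2).getD [])).all (fun p => p.1 < p.2) &&   -- se[::2] vs te[::2]
  (((PySem.List.slice? se (some 1) none 2).getD []).zip
     ((PySem.List.slice? te (some 1) none 2).getD [])).all (fun p => p.1 > p.2)  -- se[1::2] vs te[1::2]

-- ===== PRECONDITION & SPEC =====
def Spec_strange_order (s : String) (t : String) (out : Bool) : Prop := out = strange_order_alt s t
instance (s : String) (t : String) (out : Bool) : Decidable (Spec_strange_order s t out) := by unfold Spec_strange_order; infer_instance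

-- ===== CLAIM (what is proved, stated in full; the proofs are below) =====
def Claim_equal_strange_order : Prop := ∀ (s : String) (t : String), Dom_strange_order s t → Spec_strange_order s t (strange_order s t)

-- ===== LEMMAS AND PROOFS =====
def everyOther {α : Type} : List α → List α
  | [] => []
  | [a] => [a]
  | a :: _ :: r => a :: everyOther r

theorem everyOther_cons_tail {α : Type} (a : α) (l : List α) :
    everyOther (a :: l) = a :: everyOther l.tail := by
  cases l <;> rfl

theorem filterMap_range_everyOther {α : Type} (r : List α) :
    (List.range ((r.length + 1) / 2)).filterMap (fun k => r[2 * k]?) = everyOther r := by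
  induction r using everyOther.induct with
  | case1 => simp [everyOther]
  | case2 a => simp [everyOther]
  | case3 a b r ih =>
    have hlen : ((a :: b :: r).length + 1) / 2 = (r.length + 1) / 2 + 1 := by
      simp; omega
    rw [hlen, List.range_succ_eq_map, List.filterMap_cons]
    simp only [List.filterMap_map]
    have hfun : ∀ k ∈ List.range ((r.length + 1) / 2),
        ((fun k => (a :: b :: r)[2 * k]?) ∘ (fun i => i + 1)) k = (fun k => r[2 * k]?) k := by
      intro k _
      have h2 : 2 * (k + 1) = 2 * k + 1 + 1 := by ring
      simp [Function.comp, h2]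
    rw [List.filterMap_congr hfun, ih]
    simp [everyOther]

theorem slice2_none {α : Type} (xs : List α) :
    PySem.List.slice? xs none none 2 = some (everyOther xs) := by
  rw [← filterMap_range_everyOther]
  simp only [PySem.List.slice?, PySem.List.sliceIndices]
  norm_num
  rw [show (if 0 < xs.length then (((xs.length : Int) + 2 - 1) / 2).toNat else 0)
      = (xs.length + 1) / 2 from by split <;> omega]
  apply List.filterMap_congr
  intro k _
  rw [show ((2 : Int) * (k : Int)).toNat = 2 * k from by omega]

theorem slice2_one {α : Type} (xs : List α) :
    PySem.List.slice? xs (some 1) none 2 = some (everyOther xs.tail) := by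
  cases xs with
  | nil => rfl
  | cons a r =>
    rw [← filterMap_range_everyOther]
    simp only [PySem.List.slice?, PySem.List.sliceIndices]
    norm_num
    rw [show (if 0 < r.length then (((r.length : Int) + 2 - 1) / 2).toNat else 0)
        = (r.length + 1) / 2 from by split <;> omega]
    apply List.filterMap_congr
    intro k _
    rw [show ((1 : Int) + 2 * (k : Int)).toNat = 2 * k + 1 from by omega]
    simp

theorem zip_everyOther {α β : Type} :
    ∀ (u : List α) (v : List β), u.length = v.length →
      (everyOther u).zip (everyOther v) = everyOther (u.zip v) := by
  intro u
  induction u using everyOther.induct with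
  | case1 => intro v h; simp [everyOther]
  | case2 a =>
    intro v h
    match v with
    | [b] => rfl
  | case3 a b r ih =>
    intro v h
    match v with
    | c :: d :: w =>
      simp only [everyOther, List.zip_cons_cons]
      rw [ih w (by simpa using h)]

-- alternating reference check over the zipped pairs
def altChk : List (Char × Char) → Bool → Bool
  | [], _ => true
  | p :: rest, flag => (if flag then p.1 < p.2 else p.2 < p.1) && altChk rest (!flag)

theorem B_alt : ∀ (z : List (Char × Char)),
    ((everyOther z).all (fun p => p.1 < p.2) && (everyOther z.tail).all (fun p => p.1 > p.2))
      = altChk z true := by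
  intro z
  induction z using everyOther.induct with
  | case1 => rfl
  | case2 p => simp [everyOther, altChk]
  | case3 p q r ih =>
    rw [show (p :: q :: r).tail = q :: r from rfl, everyOther_cons_tail q r]
    simp only [everyOther, List.all_cons, altChk, Bool.not_true, Bool.not_false]
    rw [← ih]
    cases decide (p.1 < p.2) <;> cases decide (p.2 < p.1) <;>
      cases decide (q.1 > q.2) <;> cases (everyOther r).all (fun p => p.1 < p.2) <;>
      simp [gt_iff_lt]
  
theorem parity_flip (i : Nat) : ((i + 1) % 2 == 0) = !(i % 2 == 0) := by
  rcases Nat.mod_two_eq_zero_or_one i with h | h <;> simp [Nat.add_mod, h]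

theorem take_zip_eq {α β : Type} :
    ∀ (n : Nat) (u : List α) (v : List β), (u.zip v).take n = (u.take n).zip (v.take n) := by
  intro n
  induction n with
  | zero => simp
  | succ k ih =>
    intro u v
    cases u <;> cases v <;> simp [ih]

theorem A_loop (ls lt : List Char) (m : Nat) (hm1 : m ≤ ls.length) (hm2 : m ≤ lt.length) :
    ∀ i, strangeLoopA ls lt m i = altChk (((ls.zip lt).take m).drop i) (i % 2 == 0) := by
  have hlen : ((ls.zip lt).take m).length = m := by
    simp [List.length_take, List.length_zip]; omega
  have hdone : ∀ i, ¬ i < m →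
      strangeLoopA ls lt m i = altChk (((ls.zip lt).take m).drop i) (i % 2 == 0) := by
    intro i h
    rw [strangeLoopA, dif_neg h]
    rw [List.drop_eq_nil_of_le (by omega)]
    rfl
  have key : ∀ fuel i, m - i ≤ fuel →
      strangeLoopA ls lt m i = altChk (((ls.zip lt).take m).drop i) (i % 2 == 0) := by
    intro fuel
    induction fuel with
    | zero => intro i hle; exact hdone i (by omega)
    | succ f ih =>
      intro i hle
      by_cases h : i < m
      · rw [strangeLoopA, dif_pos h]
        have hi : i < ((ls.zip lt).take m).length := by omega
        rw [List.drop_eq_getElem_cons hi]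
        have hget : ((ls.zip lt).take m)[i] = (ls[i]'(by omega), lt[i]'(by omega)) := by
          simp [List.getElem_take, List.getElem_zip]
        rw [hget, altChk, ih (i + 1) (by omega), parity_flip]
        have h1 : ls.getD i ' ' = ls[i]'(by omega) := List.getD_eq_getElem ls ' ' (by omega)
        have h2 : lt.getD i ' ' = lt[i]'(by omega) := List.getD_eq_getElem lt ' ' (by omega)
        rw [h1, h2]
        cases hp : (i % 2 == 0) with
        | true =>
          rcases lt_or_ge (ls[i]'(by omega)) (lt[i]'(by omega)) with hlt | hge
          · simp [hlt, not_le.mpr hlt]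
          · simp [hge, not_lt.mpr hge]
        | false =>
          rcases lt_or_ge (lt[i]'(by omega)) (ls[i]'(by omega)) with hlt | hge
          · simp [hlt, not_le.mpr hlt]
          · simp [hge, not_lt.mpr hge]
      · exact hdone i h
  intro i
  exact key (m - i) i (le_refl _)

theorem main_equiv (ls lt : List Char) :
    strangeLoopA ls lt (if ls.length < lt.length then ls.length else lt.length) 0 =
      ((((PySem.List.slice? (PySem.List.slice ls none (some ((min ls.length lt.length : Nat) : Int))) none none 2).getD []).zip
          ((PySem.List.slice? (PySem.List.slice lt none (some ((min ls.length lt.length : Nat) : Int))) none none 2).getD [])).all (fun p => p.1 < p.2) &&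
       (((PySem.List.slice? (PySem.List.slice ls none (some ((min ls.length lt.length : Nat) : Int))) (some 1) none 2).getD []).zip
          ((PySem.List.slice? (PySem.List.slice lt none (some ((min ls.length lt.length : Nat) : Int))) (some 1) none 2).getD [])).all (fun p => p.1 > p.2)) := by
  set m := min ls.length lt.length with hm
  have hshort : (if ls.length < lt.length then ls.length else lt.length) = m := by
    rw [hm]; split <;> omega
  rw [hshort]
  rw [PySem.List.slice_to_natCast ls m, PySem.List.slice_to_natCast lt m]
  simp only [slice2_none, slice2_one, Option.getD_some]
  have hlen : (ls.take m).length = (lt.take m).length := by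
    simp [List.length_take]; omega
  have htail : (ls.take m).tail.length = (lt.take m).tail.length := by
    simp [hlen]
  rw [zip_everyOther _ _ hlen, zip_everyOther _ _ htail,
      show (ls.take m).tail.zip (lt.take m).tail = ((ls.take m).zip (lt.take m)).tail by
        cases h1 : ls.take m <;> cases h2 : lt.take m <;> simp_all,
      B_alt]
  rw [A_loop ls lt m (by omega) (by omega) 0]
  rw [take_zip_eq m ls lt]
  rfl

-- ===== VERDICT (by name: the statement is the Claim_ definition above) =====
theorem strange_order_spec : Claim_equal_strange_order := by
  intro s t _
  show strange_order s t = strange_order_alt s t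
  exact main_equiv s.toList t.toList
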